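-- pv_equiv track=rewrite | github.com/jeremychang9/Dynamic-Plug-and-Play-Rational-Speech-Act-Framework | evaluation.py | get_user_emotional_state
-- ===== SOURCE A (Python) =====
-- def get_user_emotional_state(usr_eds, speaker_roles):
--
--     user_emotional_state = 'neutral'
--     for i, usr_ed in enumerate(usr_eds):
--         if usr_ed == None: # skip sys_ed
--             continue
--         for j ,(ed, role) in reversed(list(enumerate(zip(usr_ed, speaker_roles[0])))):
--             if role == 'sys' and ed == 1: # user is in the inter-personal state
--                 user_emotional_state = 'inter-personal' # system should be in the self-contagion state
--                 return user_emotional_state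
--
--             elif role == 'usr' and ed == 1: # user is in the self-contagion state
--                 user_emotional_state = 'self-contagion' # system should be in the inter-personal state
--
--     return user_emotional_state
-- ===== SOURCE B (Python) =====
-- def get_user_emotional_state(usr_eds, speaker_roles):
--     vecs = [u for u in usr_eds if u is not None]
--     if not vecs:
--         return 'neutral'
--     roles = speaker_roles[0]
--     if any(e == 1 and r == 'sys' for u in vecs for e, r in zip(u, roles)):
--         return 'inter-personal'
--     if any(e == 1 and r == 'usr' for u in vecs for e, r in zip(u, roles)):
--         return 'self-contagion'
--     return 'neutral'
-- ===== Notes on version B (the rewrite author's own statement) =====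
-- stated objective: simpler
-- what changed: Replaces A's stateful combined scan (reversed enumerate with a mutable state variable and an early return inside it) by a prefilter of the non-None vectors followed by two priority-ordered existence passes (any sys-hit -> 'inter-personal', else any usr-hit -> 'self-contagion', else 'neutral').
import Mathlib
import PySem

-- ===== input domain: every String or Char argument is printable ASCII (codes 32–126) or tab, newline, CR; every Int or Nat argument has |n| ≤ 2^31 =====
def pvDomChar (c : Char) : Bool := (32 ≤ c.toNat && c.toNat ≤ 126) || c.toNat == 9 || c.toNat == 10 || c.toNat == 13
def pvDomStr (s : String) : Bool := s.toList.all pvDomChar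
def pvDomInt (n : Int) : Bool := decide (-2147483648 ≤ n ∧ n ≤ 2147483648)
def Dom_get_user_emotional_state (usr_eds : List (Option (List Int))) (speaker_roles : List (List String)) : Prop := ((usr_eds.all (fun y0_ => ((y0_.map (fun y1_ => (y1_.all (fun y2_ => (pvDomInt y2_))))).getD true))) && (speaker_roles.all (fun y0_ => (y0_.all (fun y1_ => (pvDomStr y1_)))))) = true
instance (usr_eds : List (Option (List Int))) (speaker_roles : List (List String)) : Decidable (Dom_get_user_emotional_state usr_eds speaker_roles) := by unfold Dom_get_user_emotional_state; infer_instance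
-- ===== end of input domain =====

-- B replaces A's stateful combined early-return scan by a prefilter of non-None vectors
-- plus two priority-ordered existence passes (simpler decomposition; same asymptotic cost).


-- ===== PORT A =====
-- inner loop of A over the reversed enumerated zip; returns (some r, _) on early return,
-- otherwise (none, final state)
def pvA_inner : List (Int × (Int × String)) → String → Option String × String
  | [], st => (none, st)
  | (_, (ed, role)) :: rest, st =>
    if role == "sys" && ed == 1 then (some "inter-personal", st)
    else if role == "usr" && ed == 1 then pvA_inner rest "self-contagion"
    else pvA_inner rest st

-- outer loop of A over enumerate(usr_eds); speaker_roles[0] only read for non-None usr_ed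
-- (Pre_ guarantees it exists; .getD [] is never reached under Pre_)
def pvA_outer : List (Int × Option (List Int)) → List (List String) → String → String
  | [], _, st => st
  | (_, none) :: rest, sr, st => pvA_outer rest sr st
  | (_, some u) :: rest, sr, st =>
    let roles := (PySem.List.pyGet? sr 0).getD []
    let pairs := (PySem.List.enumerate (u.zip roles)).reverse
    match pvA_inner pairs st with
    | (some r, _) => r
    | (none, st') => pvA_outer rest sr st'

def get_user_emotional_state (usr_eds : List (Option (List Int))) (speaker_roles : List (List String)) : String :=
  pvA_outer (PySem.List.enumerate usr_eds) speaker_roles "neutral"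

-- ===== PORT B =====
def get_user_emotional_state_alt (usr_eds : List (Option (List Int))) (speaker_roles : List (List String)) : String :=
  let vecs := usr_eds.filterMap id
  if vecs.isEmpty then "neutral"
  else
    let roles := (PySem.List.pyGet? speaker_roles 0).getD []
    if vecs.any (fun u => (u.zip roles).any (fun p => p.1 == 1 && p.2 == "sys")) then "inter-personal"
    else if vecs.any (fun u => (u.zip roles).any (fun p => p.1 == 1 && p.2 == "usr")) then "self-contagion"
    else "neutral"

-- ===== PRECONDITION & SPEC =====
-- A (and B) raise IndexError on speaker_roles[0] exactly when some usr_ed is non-None and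
-- speaker_roles is empty; Pre_ excludes exactly those inputs.
def Pre_get_user_emotional_state (usr_eds : List (Option (List Int))) (speaker_roles : List (List String)) : Prop :=
  speaker_roles ≠ [] ∨ ∀ u ∈ usr_eds, u = none
instance (usr_eds : List (Option (List Int))) (speaker_roles : List (List String)) : Decidable (Pre_get_user_emotional_state usr_eds speaker_roles) := by unfold Pre_get_user_emotional_state; infer_instance
def pvWitness_get_user_emotional_state : List (Option (List Int)) × List (List String) :=
  ([some [1, 0], none], [["usr", "sys"]])
def Spec_get_user_emotional_state (usr_eds : List (Option (List Int))) (speaker_roles : List (List String)) (out : String) : Prop := out = get_user_emotional_state_alt usr_eds speaker_roles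
instance (usr_eds : List (Option (List Int))) (speaker_roles : List (List String)) (out : String) : Decidable (Spec_get_user_emotional_state usr_eds speaker_roles out) := by unfold Spec_get_user_emotional_state; infer_instance

-- ===== CLAIM (what is proved, stated in full; the proofs are below) =====
def Claim_equal_get_user_emotional_state : Prop := ∀ (usr_eds : List (Option (List Int))) (speaker_roles : List (List String)), Dom_get_user_emotional_state usr_eds speaker_roles → Pre_get_user_emotional_state usr_eds speaker_roles → Spec_get_user_emotional_state usr_eds speaker_roles (get_user_emotional_state usr_eds speaker_roles)

-- ===== LEMMAS AND PROOFS =====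

def pvSysHit (p : Int × String) : Bool := p.1 == 1 && p.2 == "sys"
def pvUsrHit (p : Int × String) : Bool := p.1 == 1 && p.2 == "usr"

-- inner loop returns early iff some sys-hit occurs among the pairs
theorem pvA_inner_fst (pairs : List (Int × (Int × String))) (st : String) :
    (pvA_inner pairs st).1 =
      if pairs.any (fun p => pvSysHit p.2) then some "inter-personal" else none := by
  induction pairs generalizing st with
  | nil => simp [pvA_inner]
  | cons hd tl ih =>
    obtain ⟨j, ed, role⟩ := hd
    have hsys : pvSysHit (ed, role) = (role == "sys" && ed == 1) := by
      simp [pvSysHit, Bool.and_comm]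
    simp only [pvA_inner, List.any_cons, hsys]
    cases hs : (role == "sys" && ed == 1)
    · simp only [Bool.false_eq_true, if_false, Bool.false_or]
      split <;> exact ih _
    · simp

-- when no early return, the final state is "self-contagion" iff some usr-hit occurs
theorem pvA_inner_snd (pairs : List (Int × (Int × String))) (st : String)
    (h : pairs.any (fun p => pvSysHit p.2) = false) :
    (pvA_inner pairs st).2 =
      if pairs.any (fun p => pvUsrHit p.2) then "self-contagion" else st := by
  induction pairs generalizing st with
  | nil => simp [pvA_inner]
  | cons hd tl ih =>
    obtain ⟨j, ed, role⟩ := hd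
    simp only [List.any_cons, Bool.or_eq_false_iff] at h
    obtain ⟨h1, h2⟩ := h
    have husr : pvUsrHit (ed, role) = (role == "usr" && ed == 1) := by
      simp [pvUsrHit, Bool.and_comm]
    have hs : (role == "sys" && ed == 1) = false := by
      simpa [pvSysHit, Bool.and_comm] using h1
    simp only [pvA_inner, List.any_cons, hs, Bool.false_eq_true, if_false, husr]
    cases hu : (role == "usr" && ed == 1)
    · simp only [Bool.false_eq_true, if_false, Bool.false_or]
      exact ih _ h2
    · simp [ih _ h2]

-- existence over reversed enumerate = existence over the underlying list
theorem any_rev_enum (xs : List (Int × String)) (f : Int × String → Bool) :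
    ((PySem.List.enumerate xs).reverse.any (fun p => f p.2)) = xs.any f := by
  rw [List.any_reverse]
  have h1 : ((PySem.List.enumerate xs).any fun p => f p.2)
      = ((PySem.List.enumerate xs).map (·.2)).any f := by
    rw [List.any_map]; rfl
  rw [h1, PySem.List.map_snd_enumerate]

-- existence over enumerate of options = existence over filterMap id
theorem any_enum_opt (l : List (Option (List Int))) (g : List Int → Bool) :
    ((PySem.List.enumerate l).any (fun q => (q.2.map g).getD false)) = (l.filterMap id).any g := by
  have h1 : ((PySem.List.enumerate l).any fun q => (q.2.map g).getD false)
      = ((PySem.List.enumerate l).map (·.2)).any (fun y => (y.map g).getD false) := by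
    rw [List.any_map]; rfl
  rw [h1, PySem.List.map_snd_enumerate]
  clear h1
  induction l with
  | nil => simp
  | cons hd tl ih =>
    cases hd with
    | none => simpa using ih
    | some u => simp only [List.any_cons, List.filterMap_cons]; simp [ih]

-- characterisation of A's outer loop
theorem pvA_outer_eq (ps : List (Int × Option (List Int))) (sr : List (List String)) (st : String) :
    pvA_outer ps sr st =
      (if ps.any (fun q => (q.2.map (fun u => (u.zip ((PySem.List.pyGet? sr 0).getD [])).any pvSysHit)).getD false) then "inter-personal"
      else if ps.any (fun q => (q.2.map (fun u => (u.zip ((PySem.List.pyGet? sr 0).getD [])).any pvUsrHit)).getD false) then "self-contagion"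
      else st) := by
  induction ps generalizing st with
  | nil => simp [pvA_outer]
  | cons hd tl ih =>
    obtain ⟨i, o⟩ := hd
    cases o with
    | none => simpa [pvA_outer] using ih st
    | some u =>
      simp only [pvA_outer]
      rcases hpi : pvA_inner ((PySem.List.enumerate
          (u.zip ((PySem.List.pyGet? sr 0).getD []))).reverse) st with ⟨res, st'⟩
      have h1 := pvA_inner_fst ((PySem.List.enumerate
          (u.zip ((PySem.List.pyGet? sr 0).getD []))).reverse) st
      rw [hpi, any_rev_enum] at h1
      by_cases hsy : (u.zip ((PySem.List.pyGet? sr 0).getD [])).any pvSysHit = true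
      · simp only [hsy, if_true] at h1
        subst h1
        simp [hsy]
      · simp only [hsy] at h1
        simp only [Bool.false_eq_true, if_false] at h1
        subst h1
        have h2 := pvA_inner_snd ((PySem.List.enumerate
            (u.zip ((PySem.List.pyGet? sr 0).getD []))).reverse) st
            (by rw [any_rev_enum]; simpa using hsy)
        rw [hpi, any_rev_enum] at h2
        show pvA_outer tl sr st' = _
        rw [ih st']
        simp only [List.any_cons, Option.map_some, Option.getD_some]
        by_cases hts : (tl.any fun q =>
            ((q.2.map fun u => (u.zip ((PySem.List.pyGet? sr 0).getD [])).any pvSysHit).getD false)) = true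
        · simp [hts, hsy]
        · by_cases hu : (u.zip ((PySem.List.pyGet? sr 0).getD [])).any pvUsrHit = true
          · simp only [hu, if_true] at h2
            simp [hts, hsy, hu, h2]
          · have hu' : (u.zip ((PySem.List.pyGet? sr 0).getD [])).any pvUsrHit = false := by
              simpa using hu
            simp only [hu', Bool.false_eq_true, if_false] at h2
            have hsy' : (u.zip ((PySem.List.pyGet? sr 0).getD [])).any pvSysHit = false := by
              simpa using hsy
            simp only [hsy', hu', Bool.false_or, h2]

theorem get_user_emotional_state_spec : Claim_equal_get_user_emotional_state := by
  intro usr_eds sr _ _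
  unfold Spec_get_user_emotional_state get_user_emotional_state get_user_emotional_state_alt
  rw [pvA_outer_eq, any_enum_opt, any_enum_opt]
  by_cases hv : (usr_eds.filterMap id).isEmpty
  · have hnil : usr_eds.filterMap id = [] := List.isEmpty_iff.mp hv
    rw [hnil]
    simp
  · simp only [hv, Bool.false_eq_true, if_false]
    rfl
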